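-- pv_equiv track=rewrite | github.com/Erdaulet0341/Python_1course-2semester | Lab5/acmp/acmp(45).py | check_devise
-- ===== SOURCE A (Python) =====
-- def check_devise(x):
--     cnt = 0
--     for i in range(1, 10, 1):
--         if x%i==0:
--             cnt+=1
--     if cnt == 1:
--         return False
--     else:
--         return True
-- ===== SOURCE B (Python) =====
-- def check_devise(x):
--     # divisible by some of 2..9  <=>  divisible by 2, 3, 5 or 7
--     return x % 2 == 0 or x % 3 == 0 or x % 5 == 0 or x % 7 == 0
-- ===== Notes on version B (the rewrite author's own statement) =====
-- stated objective: simpler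
-- what changed: Replaces the divisor-counting loop over the range and the count comparison with a direct boolean divisibility test against the four primes below ten (divisibility by a composite in the range implies divisibility by one of them).
import Mathlib
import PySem

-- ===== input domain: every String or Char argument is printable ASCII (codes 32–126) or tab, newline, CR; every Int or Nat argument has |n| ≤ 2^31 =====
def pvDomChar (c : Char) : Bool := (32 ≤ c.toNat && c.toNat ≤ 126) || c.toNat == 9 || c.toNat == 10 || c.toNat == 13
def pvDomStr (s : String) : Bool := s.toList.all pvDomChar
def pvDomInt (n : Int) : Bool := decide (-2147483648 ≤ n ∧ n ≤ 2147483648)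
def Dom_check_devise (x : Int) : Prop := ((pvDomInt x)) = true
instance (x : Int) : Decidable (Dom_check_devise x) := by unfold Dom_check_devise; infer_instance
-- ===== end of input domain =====

-- B replaces the 1..9 divisor-counting loop with a direct test against the primes 2,3,5,7 (simpler).


-- ===== PORT A =====
def check_devise (x : Int) : Bool :=
  let cnt : Int :=
    (PySem.List.pyRange 1 10 1).foldl
      (fun cnt i => if PySem.Int.mod x i = 0 then cnt + 1 else cnt) 0
  if cnt = 1 then false else true

-- ===== PORT B =====
def check_devise_alt (x : Int) : Bool :=
  (PySem.Int.mod x 2 == 0) || (PySem.Int.mod x 3 == 0) ||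
  (PySem.Int.mod x 5 == 0) || (PySem.Int.mod x 7 == 0)

-- ===== PRECONDITION & SPEC =====
def Spec_check_devise (x : Int) (out : Bool) : Prop := out = check_devise_alt x
instance (x : Int) (out : Bool) : Decidable (Spec_check_devise x out) := by unfold Spec_check_devise; infer_instance

-- ===== CLAIM (what is proved, stated in full; the proofs are below) =====
def Claim_equal_check_devise : Prop := ∀ (x : Int), Dom_check_devise x → Spec_check_devise x (check_devise x)

-- ===== LEMMAS AND PROOFS =====
theorem pyRange_1_10 : PySem.List.pyRange 1 10 1 = [1,2,3,4,5,6,7,8,9] := by decide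

theorem foldl_count_eq_sum (P : Int → Prop) [DecidablePred P] :
    ∀ (l : List Int) (c : Int),
      l.foldl (fun c i => if P i then c + 1 else c) c
        = c + (l.map (fun i => if P i then (1 : Int) else 0)).sum := by
  intro l
  induction l with
  | nil => intro c; simp
  | cons a t ih =>
      intro c
      by_cases h : P a <;> simp [List.foldl, h, ih] <;> ring

-- both programs depend on x only through its residues mod 1..9, hence only on x % 2520
theorem checkA_mod (x : Int) : check_devise x = check_devise (x % 2520) := by
  unfold check_devise
  rw [pyRange_1_10,
      foldl_count_eq_sum (fun i => PySem.Int.mod x i = 0),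
      foldl_count_eq_sum (fun i => PySem.Int.mod (x % 2520) i = 0)]
  simp only [List.map, List.sum_cons, List.sum_nil,
    PySem.Int.mod_eq_emod_of_pos (show (0:Int) < 1 by norm_num),
    PySem.Int.mod_eq_emod_of_pos (show (0:Int) < 2 by norm_num),
    PySem.Int.mod_eq_emod_of_pos (show (0:Int) < 3 by norm_num),
    PySem.Int.mod_eq_emod_of_pos (show (0:Int) < 4 by norm_num),
    PySem.Int.mod_eq_emod_of_pos (show (0:Int) < 5 by norm_num),
    PySem.Int.mod_eq_emod_of_pos (show (0:Int) < 6 by norm_num),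
    PySem.Int.mod_eq_emod_of_pos (show (0:Int) < 7 by norm_num),
    PySem.Int.mod_eq_emod_of_pos (show (0:Int) < 8 by norm_num),
    PySem.Int.mod_eq_emod_of_pos (show (0:Int) < 9 by norm_num)]
  rw [Int.emod_emod_of_dvd x (show (1:Int) ∣ 2520 by norm_num),
      Int.emod_emod_of_dvd x (show (2:Int) ∣ 2520 by norm_num),
      Int.emod_emod_of_dvd x (show (3:Int) ∣ 2520 by norm_num),
      Int.emod_emod_of_dvd x (show (4:Int) ∣ 2520 by norm_num),
      Int.emod_emod_of_dvd x (show (5:Int) ∣ 2520 by norm_num),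
      Int.emod_emod_of_dvd x (show (6:Int) ∣ 2520 by norm_num),
      Int.emod_emod_of_dvd x (show (7:Int) ∣ 2520 by norm_num),
      Int.emod_emod_of_dvd x (show (8:Int) ∣ 2520 by norm_num),
      Int.emod_emod_of_dvd x (show (9:Int) ∣ 2520 by norm_num)]

theorem checkB_mod (x : Int) : check_devise_alt x = check_devise_alt (x % 2520) := by
  unfold check_devise_alt
  simp only [
    PySem.Int.mod_eq_emod_of_pos (show (0:Int) < 2 by norm_num),
    PySem.Int.mod_eq_emod_of_pos (show (0:Int) < 3 by norm_num),
    PySem.Int.mod_eq_emod_of_pos (show (0:Int) < 5 by norm_num),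
    PySem.Int.mod_eq_emod_of_pos (show (0:Int) < 7 by norm_num)]
  rw [Int.emod_emod_of_dvd x (show (2:Int) ∣ 2520 by norm_num),
      Int.emod_emod_of_dvd x (show (3:Int) ∣ 2520 by norm_num),
      Int.emod_emod_of_dvd x (show (5:Int) ∣ 2520 by norm_num),
      Int.emod_emod_of_dvd x (show (7:Int) ∣ 2520 by norm_num)]

set_option maxRecDepth 100000 in
theorem key_residues : ∀ n : Nat, n < 2520 → check_devise (n : Int) = check_devise_alt (n : Int) := by
  decide

-- ===== VERDICT (by name: the statement is the Claim_ definition above) =====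
theorem check_devise_spec : Claim_equal_check_devise := by
  intro x _
  unfold Spec_check_devise
  rw [checkA_mod, checkB_mod]
  have h1 : 0 ≤ x % 2520 := Int.emod_nonneg x (by norm_num)
  have h2 : x % 2520 < 2520 := Int.emod_lt_of_pos x (by norm_num)
  rw [show x % 2520 = ((x % 2520).toNat : Int) from (Int.toNat_of_nonneg h1).symm]
  exact key_residues _ (by omega)
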